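-- pv_equiv track=rewrite | github.com/axkusakin/z-curve | z_curve.py | genome_coordinates
-- ===== SOURCE A (Python) =====
-- def genome_coordinates(genome):
--     """Counts coordinates.
--     x = R-Y (purine - pyrimidine),
--     y = M-K (amino - keto),
--     z = W-S (strongH bond - weak-H bond).
--     """
--     count_x, count_y, count_z = 0, 0, 0
--     coordinates = {'x': [], 'y': [], 'z': []}
--     for nucleotide in genome:
--         if nucleotide == 'A':
--             count_x += 1
--             count_y += 1
--             count_z += 1
--         elif nucleotide == 'T':
--             count_x -= 1
--             count_y -= 1
--             count_z += 1
--         elif nucleotide == 'G':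
--             count_x += 1
--             count_y -= 1
--             count_z -= 1
--         elif nucleotide == 'C':
--             count_x -= 1
--             count_y += 1
--             count_z -= 1
--         coordinates['x'].append(count_x * 2)
--         coordinates['y'].append(count_y * 2)
--         coordinates['z'].append(count_z * 2)
--     return coordinates
-- ===== SOURCE B (Python) =====
-- _D = {'A': (1, 1, 1), 'T': (-1, -1, 1), 'G': (1, -1, -1), 'C': (-1, 1, -1)}
--
-- def _rec(s):
--     """Divide and conquer: cumulative (unscaled) x,y,z sums of s."""
--     if len(s) == 0:
--         return ([], [], [])
--     if len(s) == 1: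
--         dx, dy, dz = _D.get(s[0], (0, 0, 0))
--         return ([dx], [dy], [dz])
--     m = len(s) // 2
--     lx, ly, lz = _rec(s[:m])
--     rx, ry, rz = _rec(s[m:])
--     ax, ay, az = lx[-1], ly[-1], lz[-1]
--     return (lx + [ax + v for v in rx],
--             ly + [ay + v for v in ry],
--             lz + [az + v for v in rz])
--
-- def genome_coordinates(genome):
--     xs, ys, zs = _rec(genome)
--     return {'x': [v * 2 for v in xs],
--             'y': [v * 2 for v in ys],
--             'z': [v * 2 for v in zs]}
-- ===== Notes on version B (the rewrite author's own statement) =====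
-- stated objective: alternative
-- what changed: Replaces A's single left-to-right running-counter scan with a divide-and-conquer recursion: compute each half's cumulative coordinates independently, then offset the right half's lists by the left half's final totals, scaling by 2 once at the end.
import Mathlib
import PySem

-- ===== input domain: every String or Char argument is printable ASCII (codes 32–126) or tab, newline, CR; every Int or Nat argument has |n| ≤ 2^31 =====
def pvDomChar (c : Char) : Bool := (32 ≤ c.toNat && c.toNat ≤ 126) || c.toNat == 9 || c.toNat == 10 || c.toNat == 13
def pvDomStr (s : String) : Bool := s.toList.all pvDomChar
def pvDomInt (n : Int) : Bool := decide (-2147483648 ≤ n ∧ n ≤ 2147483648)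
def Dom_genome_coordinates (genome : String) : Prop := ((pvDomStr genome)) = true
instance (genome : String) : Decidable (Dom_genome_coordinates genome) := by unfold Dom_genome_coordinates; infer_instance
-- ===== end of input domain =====

-- B replaces A's single left-to-right running-counter scan by a divide-and-conquer
-- recursion (halve, solve each half, offset the right half by the left's totals);
-- objective: alternative (not faster).

-- ===== PORT A =====
-- A's loop: three running counters, three result lists appended to in one pass.
def gcLoopA : List Char → Int → Int → Int → List Int → List Int → List Int → List (String × List Int)
  | [], _, _, _, xs, ys, zs => [("x", xs), ("y", ys), ("z", zs)]
  | c :: rest, cx, cy, cz, xs, ys, zs =>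
    let cx' := if c = 'A' then cx + 1 else if c = 'T' then cx - 1 else if c = 'G' then cx + 1 else if c = 'C' then cx - 1 else cx
    let cy' := if c = 'A' then cy + 1 else if c = 'T' then cy - 1 else if c = 'G' then cy - 1 else if c = 'C' then cy + 1 else cy
    let cz' := if c = 'A' then cz + 1 else if c = 'T' then cz + 1 else if c = 'G' then cz - 1 else if c = 'C' then cz - 1 else cz
    gcLoopA rest cx' cy' cz' (xs ++ [cx' * 2]) (ys ++ [cy' * 2]) (zs ++ [cz' * 2])

def genome_coordinates (genome : String) : List (String × List Int) :=
  gcLoopA genome.toList 0 0 0 [] [] []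

-- ===== PORT B =====
-- _D.get(nt, (0, 0, 0))
def gcDelta (c : Char) : Int × Int × Int :=
  if c = 'A' then (1, 1, 1)
  else if c = 'T' then (-1, -1, 1)
  else if c = 'G' then (1, -1, -1)
  else if c = 'C' then (-1, 1, -1)
  else (0, 0, 0)

-- _rec: divide and conquer. lx[-1] on the (always nonempty) left list is ported
-- as getLastD 0 (exact here: the left half is nonempty whenever this branch runs).
def gcRec : List Char → List Int × List Int × List Int
  | [] => ([], [], [])
  | [c] => let d := gcDelta c; ([d.1], [d.2.1], [d.2.2])
  | c1 :: c2 :: rest =>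
    let m := (c1 :: c2 :: rest).length / 2
    let L := gcRec ((c1 :: c2 :: rest).take m)
    let R := gcRec ((c1 :: c2 :: rest).drop m)
    (L.1 ++ R.1.map (fun v => L.1.getLastD 0 + v),
     L.2.1 ++ R.2.1.map (fun v => L.2.1.getLastD 0 + v),
     L.2.2 ++ R.2.2.map (fun v => L.2.2.getLastD 0 + v))
termination_by l => l.length
decreasing_by
  · simp [List.length_take]; omega
  · simp [List.length_drop]; omega

def genome_coordinates_alt (genome : String) : List (String × List Int) :=
  let r := gcRec genome.toList
  [("x", r.1.map (fun v => v * 2)),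
   ("y", r.2.1.map (fun v => v * 2)),
   ("z", r.2.2.map (fun v => v * 2))]

-- ===== PRECONDITION & SPEC =====
def Spec_genome_coordinates (genome : String) (out : List (String × List Int)) : Prop := out = genome_coordinates_alt genome
instance (genome : String) (out : List (String × List Int)) : Decidable (Spec_genome_coordinates genome out) := by unfold Spec_genome_coordinates; infer_instance

-- ===== CLAIM (what is proved, stated in full; the proofs are below) =====
def Claim_equal_genome_coordinates : Prop := ∀ (genome : String), Dom_genome_coordinates genome → Spec_genome_coordinates genome (genome_coordinates genome)

-- ===== LEMMAS AND PROOFS =====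
-- reference form: unscaled prefix sums with a running start s
def gcPS : List Int → Int → List Int
  | [], _ => []
  | d :: ds, s => (s + d) :: gcPS ds (s + d)

theorem gcPS_append (a b : List Int) : ∀ s, gcPS (a ++ b) s = gcPS a s ++ gcPS b (s + a.sum) := by
  induction a with
  | nil => intro s; simp [gcPS]
  | cons d ds ih => intro s; simp [gcPS, ih, add_assoc]

theorem gcPS_getLastD (ds : List Int) : ∀ s, (gcPS ds s).getLastD s = s + ds.sum := by
  induction ds with
  | nil => intro s; simp [gcPS]
  | cons d ds ih =>
    intro s
    simp only [gcPS, List.getLastD_cons, ih, List.sum_cons]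
    ring

theorem gcPS_shift (ds : List Int) : ∀ s off, (gcPS ds s).map (fun v => off + v) = gcPS ds (off + s) := by
  induction ds with
  | nil => intro s off; simp [gcPS]
  | cons d ds ih => intro s off; simp [gcPS, ih, add_assoc]

theorem gcRec_eq (l : List Char) :
    gcRec l = (gcPS (l.map fun c => (gcDelta c).1) 0,
               gcPS (l.map fun c => (gcDelta c).2.1) 0,
               gcPS (l.map fun c => (gcDelta c).2.2) 0) := by
  induction l using gcRec.induct with
  | case1 => simp [gcRec, gcPS]
  | case2 c => simp [gcRec, gcPS]
  | case3 c1 c2 rest m iht ihd =>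
    rw [gcRec]
    simp only [show m = (c1 :: c2 :: rest).length / 2 from rfl] at iht ihd
    rw [iht, ihd]
    have hsplit : (c1 :: c2 :: rest) =
        (c1 :: c2 :: rest).take ((c1 :: c2 :: rest).length / 2) ++
        (c1 :: c2 :: rest).drop ((c1 :: c2 :: rest).length / 2) := (List.take_append_drop _ _).symm
    conv_rhs => rw [hsplit]
    simp only [List.map_append, gcPS_append, gcPS_getLastD, gcPS_shift, zero_add, add_zero]

theorem gcLoopA_eq (l : List Char) : ∀ (cx cy cz : Int) (xs ys zs : List Int),
    gcLoopA l cx cy cz xs ys zs =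
      [("x", xs ++ (gcPS (l.map fun c => (gcDelta c).1) cx).map (fun v => v * 2)),
       ("y", ys ++ (gcPS (l.map fun c => (gcDelta c).2.1) cy).map (fun v => v * 2)),
       ("z", zs ++ (gcPS (l.map fun c => (gcDelta c).2.2) cz).map (fun v => v * 2))] := by
  induction l with
  | nil => intro cx cy cz xs ys zs; simp [gcLoopA, gcPS]
  | cons c rest ih =>
    intro cx cy cz xs ys zs
    have hx : (if c = 'A' then cx + 1 else if c = 'T' then cx - 1 else if c = 'G' then cx + 1 else if c = 'C' then cx - 1 else cx) = cx + (gcDelta c).1 := by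
      simp only [gcDelta]; split_ifs <;> simp <;> ring
    have hy : (if c = 'A' then cy + 1 else if c = 'T' then cy - 1 else if c = 'G' then cy - 1 else if c = 'C' then cy + 1 else cy) = cy + (gcDelta c).2.1 := by
      simp only [gcDelta]; split_ifs <;> simp <;> ring
    have hz : (if c = 'A' then cz + 1 else if c = 'T' then cz + 1 else if c = 'G' then cz - 1 else if c = 'C' then cz - 1 else cz) = cz + (gcDelta c).2.2 := by
      simp only [gcDelta]; split_ifs <;> simp <;> ring
    simp only [gcLoopA, hx, hy, hz, ih, List.map_cons, gcPS, List.append_assoc,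
      List.singleton_append]

-- ===== VERDICT (by name: the statement is the Claim_ definition above) =====
theorem genome_coordinates_spec : Claim_equal_genome_coordinates := by
  intro genome _
  unfold Spec_genome_coordinates genome_coordinates genome_coordinates_alt
  simp [gcLoopA_eq, gcRec_eq]
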